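-- pv_equiv track=rewrite | github.com/tlhpaul/Python-Project | Squarelotron/Squarelotron.py | upside_down_flip
-- ===== SOURCE A (Python) =====
-- import copy
--
-- def upside_down_flip(squarelotron, ring):
--     """This function performs the Upside-Down Flip of the squarelotron, as described above,
--     and returns the new squarelotron. The original squarelotron should not be modified (I will check for this).
--     Calling this function should not result in any input/output."""
--     new_squarelotron = copy.deepcopy(squarelotron)
--     if ring == "outer":
--         new_squarelotron[0], new_squarelotron[4] = new_squarelotron[4], new_squarelotron[0]
--         new_squarelotron[1][0], new_squarelotron[3][0] = new_squarelotron[3][0], new_squarelotron[1][0]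
--         new_squarelotron[1][4], new_squarelotron[3][4] = new_squarelotron[3][4], new_squarelotron[1][4]
--
--     elif ring == "inner":
--         for i in range (1, 4):
--             new_squarelotron[1][i], new_squarelotron[3][i] = new_squarelotron[3][i], new_squarelotron[1][i]
--
--     return new_squarelotron
-- ===== SOURCE B (Python) =====
-- import copy
--
-- def upside_down_flip(squarelotron, ring):
--     new_squarelotron = copy.deepcopy(squarelotron)
--     rank = {"outer": 0, "inner": 1}.get(ring)
--     if rank is not None:
--         for i in range(5):
--             for j in range(5):
--                 if min(i, j, 4 - i, 4 - j) == rank: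
--                     new_squarelotron[i][j] = squarelotron[4 - i][j]
--     return new_squarelotron
-- ===== Notes on version B (the rewrite author's own statement) =====
-- stated objective: idiomatic
-- what changed: Replaces A's hardcoded element/row swap statements with a single computed traversal: a dict lookup maps the ring name to its depth k, and every cell at ring depth min(i,j,4-i,4-j)==k is set to the horizontal-midline reflection old[4-i][j] of the original grid.
import Mathlib
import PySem

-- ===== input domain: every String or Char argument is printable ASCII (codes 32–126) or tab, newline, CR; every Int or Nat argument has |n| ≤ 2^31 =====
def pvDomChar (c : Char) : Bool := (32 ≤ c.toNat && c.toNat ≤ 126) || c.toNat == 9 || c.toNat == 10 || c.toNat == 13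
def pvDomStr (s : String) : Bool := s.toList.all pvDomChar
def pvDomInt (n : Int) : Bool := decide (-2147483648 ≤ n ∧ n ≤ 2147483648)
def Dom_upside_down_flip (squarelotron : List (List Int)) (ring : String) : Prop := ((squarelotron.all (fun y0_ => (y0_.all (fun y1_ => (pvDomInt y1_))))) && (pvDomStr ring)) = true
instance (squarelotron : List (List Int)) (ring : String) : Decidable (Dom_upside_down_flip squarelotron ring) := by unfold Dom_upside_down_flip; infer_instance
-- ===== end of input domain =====

-- B replaces A's hardcoded element/row swaps with one computed traversal: cells at ring
-- depth min(i,j,4-i,4-j) equal to the looked-up depth get the midline reflection old[4-i][j].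
-- (objective: idiomatic; equivalence of return values on 5x5 grids)

-- ===== PORT A =====
-- element read new[i][j] (in range under Pre_; none-defaults are never hit inside Pre_)
def pvGetE (m : List (List Int)) (i j : Nat) : Int := (m.getD i []).getD j 0
-- element write new[i][j] = v
def pvSetE (m : List (List Int)) (i j : Nat) (v : Int) : List (List Int) :=
  m.set i ((m.getD i []).set j v)
-- Python simultaneous swap new[i1][j1], new[i2][j2] = new[i2][j2], new[i1][j1]
def pvSwapE (m : List (List Int)) (i1 j1 i2 j2 : Nat) : List (List Int) :=
  let x := pvGetE m i2 j2
  let y := pvGetE m i1 j1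
  pvSetE (pvSetE m i1 j1 x) i2 j2 y

def upside_down_flip (squarelotron : List (List Int)) (ring : String) : List (List Int) :=
  -- new_squarelotron = copy.deepcopy(squarelotron)  (lists are immutable in Lean)
  let new0 := squarelotron
  if ring = "outer" then
    -- new[0], new[4] = new[4], new[0]
    let new1 := (new0.set 0 (new0.getD 4 [])).set 4 (new0.getD 0 [])
    let new2 := pvSwapE new1 1 0 3 0
    pvSwapE new2 1 4 3 4
  else if ring = "inner" then
    -- for i in range(1, 4): swap new[1][i], new[3][i]
    List.foldl (fun m i => pvSwapE m 1 i 3 i) new0 [1, 2, 3]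
  else new0

-- ===== PORT B =====
def upside_down_flip_alt (squarelotron : List (List Int)) (ring : String) : List (List Int) :=
  match PySem.Dict.get? (PySem.Dict.ofList [("outer", (0 : Nat)), ("inner", 1)]) ring with
  | none => squarelotron
  | some rank =>
    List.foldl (fun m i =>
      List.foldl (fun m j =>
        if min i (min j (min (4 - i) (4 - j))) = rank then
          pvSetE m i j (pvGetE squarelotron (4 - i) j)
        else m) m (List.range 5)) squarelotron (List.range 5)

-- ===== PRECONDITION & SPEC =====
-- Pre_ excludes non-5x5 grids when ring is "outer"/"inner": the squarelotron is specified as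
-- 5x5; A's hardcoded swaps also happen to return on some other shapes (e.g. longer rows),
-- where B's full-ring reflection returns a different value or raises.
def Pre_upside_down_flip (squarelotron : List (List Int)) (ring : String) : Prop :=
  (ring = "outer" ∨ ring = "inner") →
    (squarelotron.length = 5 ∧ ∀ r ∈ squarelotron, r.length = 5)
instance (squarelotron : List (List Int)) (ring : String) : Decidable (Pre_upside_down_flip squarelotron ring) := by unfold Pre_upside_down_flip; infer_instance

def pvWitness_upside_down_flip : List (List Int) × String :=
  ([[1, 2, 3, 4, 5], [6, 7, 8, 9, 10], [11, 12, 13, 14, 15],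
    [16, 17, 18, 19, 20], [21, 22, 23, 24, 25]], "outer")

def Spec_upside_down_flip (squarelotron : List (List Int)) (ring : String) (out : List (List Int)) : Prop := out = upside_down_flip_alt squarelotron ring
instance (squarelotron : List (List Int)) (ring : String) (out : List (List Int)) : Decidable (Spec_upside_down_flip squarelotron ring out) := by unfold Spec_upside_down_flip; infer_instance

-- ===== CLAIM (what is proved, stated in full; the proofs are below) =====
def Claim_equal_upside_down_flip : Prop := ∀ (squarelotron : List (List Int)) (ring : String), Dom_upside_down_flip squarelotron ring → Pre_upside_down_flip squarelotron ring → Spec_upside_down_flip squarelotron ring (upside_down_flip squarelotron ring)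

-- ===== LEMMAS AND PROOFS =====
theorem pvLen5 {α : Type} (l : List α) (h : l.length = 5) :
    ∃ a b c d e, l = [a, b, c, d, e] := by
  match l, h with
  | [a, b, c, d, e], _ => exact ⟨a, b, c, d, e, rfl⟩

-- ===== VERDICT (by name: the statement is the Claim_ definition above) =====
theorem upside_down_flip_spec : Claim_equal_upside_down_flip := by
  intro s ring _ hPre
  unfold Spec_upside_down_flip
  by_cases h1 : ring = "outer"
  · obtain ⟨hl, hr⟩ := hPre (Or.inl h1)
    obtain ⟨r0, r1, r2, r3, r4, rfl⟩ := pvLen5 s hl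
    obtain ⟨a0, a1, a2, a3, a4, h0⟩ := pvLen5 r0 (hr r0 (by simp))
    obtain ⟨b0, b1, b2, b3, b4, hb⟩ := pvLen5 r1 (hr r1 (by simp))
    obtain ⟨c0, c1, c2, c3, c4, hc⟩ := pvLen5 r2 (hr r2 (by simp))
    obtain ⟨d0, d1, d2, d3, d4, hd⟩ := pvLen5 r3 (hr r3 (by simp))
    obtain ⟨e0, e1, e2, e3, e4, he⟩ := pvLen5 r4 (hr r4 (by simp))
    subst h0 hb hc hd he h1
    have hget : PySem.Dict.get? (PySem.Dict.ofList [("outer", (0 : Nat)), ("inner", 1)])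
        "outer" = some 0 := by rfl
    simp [upside_down_flip, upside_down_flip_alt, hget, pvSwapE, pvSetE, pvGetE,
          List.range_succ]
  · by_cases h2 : ring = "inner"
    · obtain ⟨hl, hr⟩ := hPre (Or.inr h2)
      obtain ⟨r0, r1, r2, r3, r4, rfl⟩ := pvLen5 s hl
      obtain ⟨a0, a1, a2, a3, a4, h0⟩ := pvLen5 r0 (hr r0 (by simp))
      obtain ⟨b0, b1, b2, b3, b4, hb⟩ := pvLen5 r1 (hr r1 (by simp))
      obtain ⟨c0, c1, c2, c3, c4, hc⟩ := pvLen5 r2 (hr r2 (by simp))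
      obtain ⟨d0, d1, d2, d3, d4, hd⟩ := pvLen5 r3 (hr r3 (by simp))
      obtain ⟨e0, e1, e2, e3, e4, he⟩ := pvLen5 r4 (hr r4 (by simp))
      subst h0 hb hc hd he h2
      have hget : PySem.Dict.get? (PySem.Dict.ofList [("outer", (0 : Nat)), ("inner", 1)])
          "inner" = some 1 := by rfl
      simp [upside_down_flip, upside_down_flip_alt, hget, pvSwapE, pvSetE, pvGetE,
            List.range_succ]
    · have hitems : (PySem.Dict.ofList [("outer", (0 : Nat)), ("inner", 1)]).items
          = [("outer", 0), ("inner", 1)] := by rfl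
      have o1 : (("outer" : String) == ring) = false :=
        beq_eq_false_iff_ne.mpr (fun h => h1 h.symm)
      have o2 : (("inner" : String) == ring) = false :=
        beq_eq_false_iff_ne.mpr (fun h => h2 h.symm)
      have hget : PySem.Dict.get? (PySem.Dict.ofList [("outer", (0 : Nat)), ("inner", 1)])
          ring = none := by
        simp [PySem.Dict.get?, hitems, List.find?, o1, o2]
      simp [upside_down_flip, upside_down_flip_alt, if_neg h1, if_neg h2, hget]
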